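-- pv_equiv track=rewrite | github.com/nicelyiswell/ProjectPython-by-nite-fe | Week11/11dx.py | least_initial_balance
-- ===== SOURCE A (Python) =====
-- def least_initial_balance(transactions):
--     runing_balance = 0
--     min_balance = 0
--     for transaction in transactions :
--         runing_balance += transaction
--
--         if runing_balance<min_balance:
--             min_balance = runing_balance
--     return abs(min_balance)
-- ===== SOURCE B (Python) =====
-- def least_initial_balance(transactions):
--     # Backward "required balance" recurrence: need before a transaction t is
--     # max(0, need_after - t); the need before the whole list is the answer.
--     need = 0
--     for t in reversed(transactions):
--         need = max(0, need - t)
--     return need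
-- ===== Notes on version B (the rewrite author's own statement) =====
-- stated objective: alternative
-- what changed: Replaces A's forward pass tracking the running balance and its minimum with a backward traversal computing the dual recurrence need = max(0, need - t) over reversed transactions; no prefix sums or minimum are ever formed.
import Mathlib
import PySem

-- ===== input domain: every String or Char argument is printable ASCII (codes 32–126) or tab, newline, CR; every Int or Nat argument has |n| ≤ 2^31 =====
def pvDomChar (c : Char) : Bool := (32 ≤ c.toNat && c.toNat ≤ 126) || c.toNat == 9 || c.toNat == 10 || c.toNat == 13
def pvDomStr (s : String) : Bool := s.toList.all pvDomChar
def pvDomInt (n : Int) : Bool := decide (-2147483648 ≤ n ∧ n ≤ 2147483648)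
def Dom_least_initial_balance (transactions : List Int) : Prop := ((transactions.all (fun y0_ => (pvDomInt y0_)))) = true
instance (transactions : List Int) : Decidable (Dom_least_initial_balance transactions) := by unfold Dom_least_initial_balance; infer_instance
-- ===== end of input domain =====

-- B replaces A's forward running-balance/min pass with the dual backward recurrence
-- need = max(0, need - t) over the reversed list (alternative algorithm, same cost).


-- ===== PORT A =====
-- A's loop state: (runing_balance, min_balance)
def pvStepA (st : Int × Int) (transaction : Int) : Int × Int :=
  let r := st.1 + transaction
  (r, if r < st.2 then r else st.2)

def least_initial_balance (transactions : List Int) : Int :=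
  let st := transactions.foldl pvStepA (0, 0)
  |st.2|

-- ===== PORT B =====
-- Source B: need = 0; for t in reversed(transactions): need = max(0, need - t); return need
def least_initial_balance_alt (transactions : List Int) : Int :=
  transactions.reverse.foldl (fun need t => max 0 (need - t)) 0

-- ===== PRECONDITION & SPEC =====
def Spec_least_initial_balance (transactions : List Int) (out : Int) : Prop := out = least_initial_balance_alt transactions
instance (transactions : List Int) (out : Int) : Decidable (Spec_least_initial_balance transactions out) := by unfold Spec_least_initial_balance; infer_instance

-- ===== CLAIM (what is proved, stated in full; the proofs are below) =====
def Claim_equal_least_initial_balance : Prop := ∀ (transactions : List Int), Dom_least_initial_balance transactions → Spec_least_initial_balance transactions (least_initial_balance transactions)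

-- ===== LEMMAS AND PROOFS =====

-- min of 0 and all prefix sums of ts (the quantity both programs are about)
def pvQ : List Int → Int
  | [] => 0
  | t :: ts => min 0 (t + pvQ ts)

theorem pvQ_nonpos : ∀ ts : List Int, pvQ ts ≤ 0 := by
  intro ts; cases ts with
  | nil => simp [pvQ]
  | cons t ts => simp [pvQ]

-- A's min_balance, run from state (r, m) with m ≤ r, equals min m (r + pvQ ts)
theorem pvA_char : ∀ (ts : List Int) (r m : Int), m ≤ r →
    (ts.foldl pvStepA (r, m)).2 = min m (r + pvQ ts) := by
  intro ts
  induction ts with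
  | nil => intro r m h; simp [pvQ]; omega
  | cons t ts ih =>
    intro r m h
    simp only [List.foldl, pvStepA]
    rw [show (if r + t < m then r + t else m) = min m (r + t) by omega]
    rw [ih (r + t) (min m (r + t)) (min_le_right _ _)]
    have := pvQ_nonpos ts
    simp only [pvQ]
    omega

-- B's backward recurrence computes -pvQ
theorem pvB_char : ∀ ts : List Int,
    ts.reverse.foldl (fun need t => max 0 (need - t)) 0 = -pvQ ts := by
  intro ts
  rw [List.foldl_reverse]
  induction ts with
  | nil => simp [pvQ]
  | cons t ts ih =>
    simp only [List.foldr, pvQ, ih]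
    omega

-- ===== VERDICT (by name: the statement is the Claim_ definition above) =====
theorem least_initial_balance_spec : Claim_equal_least_initial_balance := by
  intro ts _
  unfold Spec_least_initial_balance least_initial_balance least_initial_balance_alt
  show |(ts.foldl pvStepA (0, 0)).2| = _
  rw [pvB_char, pvA_char ts 0 0 le_rfl]
  have := pvQ_nonpos ts
  rw [show min 0 ((0:Int) + pvQ ts) = pvQ ts by omega]
  exact abs_of_nonpos this
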